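-- pv_equiv track=rewrite | github.com/patrik999/EL-TempTableau | tableauTruthGen.py | getTruthValue
-- ===== SOURCE A (Python) =====
-- def getTruthValue(atom, truthValuesAtom):
--
--     tValue = None
--
--     if '-~' in atom:
--         atomTemp = atom.replace('-', '').replace('~', '')
--         tValue = truthValuesAtom[atomTemp]
--         tValue = tValue * (-1)
--         tValue = calcWeakNeg(tValue)
--     elif '-' in atom:
--         countNeg = atom.count('-')
--         atomTemp = atom.replace('-', '').replace('~', '')
--         tValue = truthValuesAtom[atomTemp]
--
--         while countNeg >= 1:
--             tValue = calcWeakNeg(tValue)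
--             countNeg=countNeg-1
--
--     elif '~' in atom:
--         atomTemp = atom.replace('-', '').replace('~', '')
--         tValue = truthValuesAtom[atomTemp]
--         tValue = tValue * (-1)
--     else:
--         tValue = truthValuesAtom[atom]
--
--     return tValue
--
-- def calcWeakNeg(tValue):
--
--     if(tValue <= 0):
--         return 2
--     else:
--         return tValue * (-1)
-- ===== SOURCE B (Python) =====
-- def getTruthValue(atom, truthValuesAtom):
--     # Simpler: one guarded lookup of the stripped atom, and the '-' chain collapses
--     # to a closed-form parity formula instead of A's repeated-application while-loop.
--     if '-' in atom or '~' in atom: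
--         v = truthValuesAtom[atom.replace('-', '').replace('~', '')]
--         if '-~' in atom:
--             return 2 if v >= 0 else v
--         if '-' in atom:
--             n = atom.count('-')
--             if n == 1:
--                 return 2 if v <= 0 else -v
--             # n >= 2: the value is locked in the {2, -2} cycle
--             return 2 if (v > 0) == (n % 2 == 0) else -2
--         return -v
--     return truthValuesAtom[atom]
-- ===== Notes on version B (the rewrite author's own statement) =====
-- stated objective: simpler
-- what changed: The while-loop that applies calcWeakNeg count('-') times is replaced by a constant-time closed form (n==1 case plus the {2,-2} parity cycle for n>=2), with a single guarded dictionary lookup of the stripped atom instead of per-branch lookups.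
import Mathlib
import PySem

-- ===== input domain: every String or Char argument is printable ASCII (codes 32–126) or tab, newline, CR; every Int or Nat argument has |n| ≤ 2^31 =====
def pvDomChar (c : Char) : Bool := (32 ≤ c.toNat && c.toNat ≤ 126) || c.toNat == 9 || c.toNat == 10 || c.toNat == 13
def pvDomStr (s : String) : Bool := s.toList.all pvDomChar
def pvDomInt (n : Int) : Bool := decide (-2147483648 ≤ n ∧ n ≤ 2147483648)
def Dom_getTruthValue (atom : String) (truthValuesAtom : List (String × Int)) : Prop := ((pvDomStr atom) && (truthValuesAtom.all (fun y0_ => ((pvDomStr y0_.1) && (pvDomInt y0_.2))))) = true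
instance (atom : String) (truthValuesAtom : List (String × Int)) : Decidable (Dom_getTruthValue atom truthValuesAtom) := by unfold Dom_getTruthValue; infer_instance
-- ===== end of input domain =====

-- B replaces A's repeated-application while-loop by a closed-form parity formula and a single
-- guarded lookup; equivalence is proved on inputs whose looked-up key is present (KeyError excluded).

-- ===== PORT A =====
def calcWeakNeg (tValue : Int) : Int :=
  if tValue ≤ 0 then 2 else tValue * (-1)

-- the 'while countNeg >= 1' loop of A, as structural recursion on the counter
def weakNegLoop : Nat → Int → Int
  | 0, t => t
  | n + 1, t => weakNegLoop n (calcWeakNeg t)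

def getTruthValue (atom : String) (truthValuesAtom : List (String × Int)) : Int :=
  let d := PySem.Dict.mk truthValuesAtom
  if PySem.Str.isIn "-~" atom then
    let atomTemp := PySem.Str.replace (PySem.Str.replace atom "-" "") "~" ""
    let t := (d.get? atomTemp).getD 0   -- KeyError excluded by Pre_
    calcWeakNeg (t * (-1))
  else if PySem.Str.isIn "-" atom then
    let countNeg := PySem.Str.count atom "-"
    let atomTemp := PySem.Str.replace (PySem.Str.replace atom "-" "") "~" ""
    let t := (d.get? atomTemp).getD 0   -- KeyError excluded by Pre_
    weakNegLoop countNeg t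
  else if PySem.Str.isIn "~" atom then
    let atomTemp := PySem.Str.replace (PySem.Str.replace atom "-" "") "~" ""
    let t := (d.get? atomTemp).getD 0   -- KeyError excluded by Pre_
    t * (-1)
  else
    (PySem.Dict.get? (PySem.Dict.mk truthValuesAtom) atom).getD 0   -- KeyError excluded by Pre_

-- ===== PORT B =====
def getTruthValue_alt (atom : String) (truthValuesAtom : List (String × Int)) : Int :=
  if PySem.Str.isIn "-" atom || PySem.Str.isIn "~" atom then
    let v := ((PySem.Dict.mk truthValuesAtom).get? (PySem.Str.replace (PySem.Str.replace atom "-" "") "~" "")).getD 0   -- KeyError excluded by Pre_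
    if PySem.Str.isIn "-~" atom then
      (if v ≥ 0 then 2 else v)
    else if PySem.Str.isIn "-" atom then
      let n := PySem.Str.count atom "-"
      if n = 1 then (if v ≤ 0 then 2 else -v)
      else (if (decide (0 < v)) == (decide (n % 2 = 0)) then 2 else -2)
    else -v
  else
    ((PySem.Dict.mk truthValuesAtom).get? atom).getD 0   -- KeyError excluded by Pre_

-- ===== PRECONDITION & SPEC =====
-- Pre_ excludes exactly the inputs where Python A raises KeyError: the key it looks up
-- (the atom stripped of '-' and '~' when the atom carries such a prefix, else the atom itself)
-- must be present in the dictionary.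
def Pre_getTruthValue (atom : String) (truthValuesAtom : List (String × Int)) : Prop :=
  ((PySem.Dict.mk truthValuesAtom).get?
    (if PySem.Str.isIn "-" atom || PySem.Str.isIn "~" atom
     then PySem.Str.replace (PySem.Str.replace atom "-" "") "~" "" else atom)).isSome = true
instance (atom : String) (truthValuesAtom : List (String × Int)) : Decidable (Pre_getTruthValue atom truthValuesAtom) := by unfold Pre_getTruthValue; infer_instance

def pvWitness_getTruthValue : String × (List (String × Int)) := ("--p", [("p", 3)])

def Spec_getTruthValue (atom : String) (truthValuesAtom : List (String × Int)) (out : Int) : Prop := out = getTruthValue_alt atom truthValuesAtom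
instance (atom : String) (truthValuesAtom : List (String × Int)) (out : Int) : Decidable (Spec_getTruthValue atom truthValuesAtom out) := by unfold Spec_getTruthValue; infer_instance

-- ===== CLAIM (what is proved, stated in full; the proofs are below) =====
def Claim_equal_getTruthValue : Prop := ∀ (atom : String) (truthValuesAtom : List (String × Int)), Dom_getTruthValue atom truthValuesAtom → Pre_getTruthValue atom truthValuesAtom → Spec_getTruthValue atom truthValuesAtom (getTruthValue atom truthValuesAtom)

-- ===== LEMMAS AND PROOFS =====

-- the {2, -2} cycle of calcWeakNeg
theorem weakNegLoop_cycle (m : Nat) :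
    weakNegLoop m 2 = (if m % 2 = 0 then (2 : Int) else -2) ∧
    weakNegLoop m (-2) = (if m % 2 = 0 then (-2 : Int) else 2) := by
  induction m with
  | zero => simp [weakNegLoop]
  | succ k ih =>
    have e1 : weakNegLoop (k + 1) 2 = weakNegLoop k (-2) := by
      show weakNegLoop k (calcWeakNeg 2) = _
      rw [show calcWeakNeg 2 = -2 by decide]
    have e2 : weakNegLoop (k + 1) (-2) = weakNegLoop k 2 := by
      show weakNegLoop k (calcWeakNeg (-2)) = _
      rw [show calcWeakNeg (-2) = 2 by decide]
    constructor
    · rw [e1, ih.2]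
      by_cases hk : k % 2 = 0
      · have hk1 : ¬ ((k + 1) % 2 = 0) := by omega
        simp [hk, hk1]
      · have hk1 : (k + 1) % 2 = 0 := by omega
        simp [hk, hk1]
    · rw [e2, ih.1]
      by_cases hk : k % 2 = 0
      · have hk1 : ¬ ((k + 1) % 2 = 0) := by omega
        simp [hk, hk1]
      · have hk1 : (k + 1) % 2 = 0 := by omega
        simp [hk, hk1]

-- closed form of A's while-loop, for at least one application
theorem weakNegLoop_closed (n : Nat) (v : Int) (h : 1 ≤ n) :
    weakNegLoop n v =
      if n = 1 then (if v ≤ 0 then 2 else -v)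
      else (if (decide (0 < v)) == (decide (n % 2 = 0)) then 2 else -2) := by
  match n, h with
  | 1, _ =>
    have e : weakNegLoop 1 v = calcWeakNeg v := rfl
    rw [e]
    by_cases hv : v ≤ 0
    · simp [calcWeakNeg, hv]
    · simp [calcWeakNeg, hv]
  | (m + 2), _ =>
    have hstep : weakNegLoop (m + 2) v = weakNegLoop m (calcWeakNeg (calcWeakNeg v)) := rfl
    have hcc : calcWeakNeg (calcWeakNeg v) = if 0 < v then 2 else -2 := by
      simp only [calcWeakNeg, mul_neg_one]
      split_ifs <;> omega
    rw [hstep, hcc]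
    have hne : ¬ (m + 2 = 1) := by omega
    by_cases hv : 0 < v
    · rw [if_pos hv, (weakNegLoop_cycle m).1]
      have hd : decide (0 < v) = true := by simpa using hv
      by_cases hm : m % 2 = 0
      · have hm2 : (m + 2) % 2 = 0 := by omega
        simp [hne, hm, hd]
      · have hm2 : ¬ ((m + 2) % 2 = 0) := by omega
        simp [hne, hm, hd]
    · rw [if_neg hv, (weakNegLoop_cycle m).2]
      have hd : decide (0 < v) = false := by simp [hv]
      by_cases hm : m % 2 = 0
      · have hm2 : (m + 2) % 2 = 0 := by omega
        simp [hne, hm, hd]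
      · have hm2 : ¬ ((m + 2) % 2 = 0) := by omega
        simp [hne, hm, hd]

-- count.go never decreases below its accumulator
theorem countGo_ge (sub : List Char) : ∀ (fuel : Nat) (l : List Char) (acc : Nat),
    acc ≤ PySem.Chars.count.go sub fuel l acc := by
  intro fuel
  induction fuel with
  | zero => intro l acc; simp [PySem.Chars.count.go]
  | succ f ih =>
    intro l acc
    cases l with
    | nil => simp [PySem.Chars.count.go]
    | cons c t =>
      simp only [PySem.Chars.count.go]
      split
      · exact le_trans (Nat.le_succ acc) (ih _ _)
      · exact ih _ _

theorem countGo_pos : ∀ (fuel : Nat) (l : List Char) (acc : Nat),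
    ('-' : Char) ∈ l → l.length ≤ fuel →
    acc + 1 ≤ PySem.Chars.count.go ['-'] fuel l acc := by
  intro fuel
  induction fuel with
  | zero =>
    intro l acc hm hl
    have : l = [] := List.eq_nil_of_length_eq_zero (Nat.le_zero.mp hl)
    subst this; simp at hm
  | succ f ih =>
    intro l acc hm hl
    cases l with
    | nil => simp at hm
    | cons c t =>
      simp only [PySem.Chars.count.go]
      by_cases hp : List.isPrefixOf ['-'] (c :: t) = true
      · rw [if_pos hp]
        exact countGo_ge _ _ _ _
      · rw [if_neg hp]
        have hc : c ≠ '-' := by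
          intro hc; subst hc
          simp [List.isPrefixOf] at hp
        have hmt : ('-' : Char) ∈ t := by
          rcases List.mem_cons.mp hm with h | h
          · exact absurd h.symm hc
          · exact h
        exact ih t acc hmt (by simpa using Nat.lt_succ_iff.mp (by simpa using hl))

-- '-' occurs in s  →  s.count('-') ≥ 1
theorem count_neg_pos (s : String) (h : ('-' : Char) ∈ s.toList) :
    1 ≤ PySem.Str.count s "-" := by
  have h0 : PySem.Str.count s "-" = PySem.Chars.count.go ['-'] s.toList.length s.toList 0 := rfl
  rw [h0]
  exact countGo_pos s.toList.length s.toList 0 h le_rfl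

theorem mem_of_isIn_dashTilde (atom : String) (h : PySem.Str.isIn "-~" atom = true) :
    ('-' : Char) ∈ atom.toList := by
  have h' : PySem.Chars.isIn "-~".toList atom.toList = true := by simpa using h
  have hinf := (PySem.Chars.isIn_iff_infix _ _).mp h'
  exact hinf.subset (by decide)

theorem isIn_dash_of_mem (atom : String) (h : ('-' : Char) ∈ atom.toList) :
    PySem.Str.isIn "-" atom = true := by
  have hinf : ("-" : String).toList <:+: atom.toList := by
    obtain ⟨s, t, hst⟩ := List.append_of_mem h
    rw [hst]
    exact ⟨s, t, by simp⟩
  have h' : PySem.Chars.isIn "-".toList atom.toList = true :=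
    (PySem.Chars.isIn_iff_infix _ _).mpr hinf
  simpa using h'

theorem mem_of_isIn_dash (atom : String) (h : PySem.Str.isIn "-" atom = true) :
    ('-' : Char) ∈ atom.toList := by
  have h' : PySem.Chars.isIn "-".toList atom.toList = true := by simpa using h
  have hinf := (PySem.Chars.isIn_iff_infix _ _).mp h'
  exact hinf.subset (by decide)

-- ===== VERDICT (by name: the statement is the Claim_ definition above) =====
theorem getTruthValue_spec : Claim_equal_getTruthValue := by
  unfold Claim_equal_getTruthValue Spec_getTruthValue
  intro atom tva _hdom _hpre
  by_cases h1 : PySem.Str.isIn "-~" atom = true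
  · -- '-~' branch: both take it; closed sign formula
    have h2 : PySem.Str.isIn "-" atom = true :=
      isIn_dash_of_mem atom (mem_of_isIn_dashTilde atom h1)
    simp only [getTruthValue, getTruthValue_alt, h1, h2, Bool.true_or, if_true,
      calcWeakNeg]
    split_ifs <;> omega
  · by_cases h2 : PySem.Str.isIn "-" atom = true
    · -- '-' branch: while-loop vs closed form
      have hn : 1 ≤ PySem.Str.count atom "-" :=
        count_neg_pos atom (mem_of_isIn_dash atom h2)
      simp only [getTruthValue, getTruthValue_alt, h1, h2, Bool.true_or, Bool.false_eq_true,
        if_false, if_true]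
      rw [weakNegLoop_closed _ _ hn]
    · by_cases h3 : PySem.Str.isIn "~" atom = true
      · -- '~' branch
        simp only [getTruthValue, getTruthValue_alt, h1, h2, h3, Bool.false_or,
          Bool.false_eq_true, if_false, if_true]
        omega
      · -- plain atom
        simp only [getTruthValue, getTruthValue_alt, h1, h2, h3, Bool.or_self,
          Bool.false_eq_true, if_false]
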